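-- pv_equiv track=rewrite | github.com/iamvickynguyen/Algorithms | binomial_coefficients.py | count_odd_coefficients
-- ===== SOURCE A (Python) =====
-- table = {}
--
-- def count_odd_coefficients(n):
--     if n == 0:
--         return 0
--     elif n == 1:
--         return 1
--     if n in table:
--         return table[n]
--     elif n % 2 == 0:
--         table[n] = 3*count_odd_coefficients(n//2)
--     else:
--         k = (n-1)//2
--         table[n] = 2*count_odd_coefficients(k) + count_odd_coefficients(k+1)
--     return table[n]
-- ===== SOURCE B (Python) =====
-- def count_odd_coefficients(n):
--     # closed form over the binary digits of n: each set bit contributes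
--     # pow3 times a power of two given by the popcount of the high bits
--     total = 0
--     pow3 = 1
--     while n > 0:
--         if n & 1:
--             total += pow3 * 2 ** bin(n >> 1).count("1")
--         pow3 *= 3
--         n >>= 1
--     return total
-- ===== Notes on version B (the rewrite author's own statement) =====
-- stated objective: alternative
-- what changed: Replaces A's memoized halving recurrence (global table, three recursive cases) with a closed-form iterative scan over the binary digits of n: each set bit contributes pow3 times two to the popcount of the remaining high bits, accumulated in a running total.
import Mathlib
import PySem

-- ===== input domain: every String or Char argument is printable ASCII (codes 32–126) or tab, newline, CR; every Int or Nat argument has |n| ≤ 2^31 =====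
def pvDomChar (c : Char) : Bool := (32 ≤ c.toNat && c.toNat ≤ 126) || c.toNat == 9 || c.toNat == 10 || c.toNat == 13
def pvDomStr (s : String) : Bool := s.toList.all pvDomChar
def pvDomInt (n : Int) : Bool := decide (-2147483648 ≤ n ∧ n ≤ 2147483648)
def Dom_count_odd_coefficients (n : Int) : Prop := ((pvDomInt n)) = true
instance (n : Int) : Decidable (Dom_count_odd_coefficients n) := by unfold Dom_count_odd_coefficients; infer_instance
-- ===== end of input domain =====

-- B replaces A's memoized halving recurrence by a closed-form iterative scan of
-- the binary digits of n (each set bit contributes pow3 times a power of two given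
-- by the popcount of the remaining high bits).
-- A mutates the global memo `table`; only the return value is claimed here.

-- ===== PORT A =====
-- A's recursion, on the Nat mirror of n (Pre_ restricts to n ≥ 0, where Python's
-- n//2 and (n-1)//2 coincide with Nat division; the global memo table does not
-- change the returned value and is omitted).
def countA_rec : Nat → Int
  | 0 => 0
  | 1 => 1
  | n+2 =>
    if (n+2) % 2 = 0 then 3 * countA_rec ((n+2)/2)
    else 2 * countA_rec ((n+2-1)/2) + countA_rec ((n+2-1)/2 + 1)
  decreasing_by all_goals omega

def count_odd_coefficients (n : Int) : Int := countA_rec n.toNat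

-- ===== PORT B =====
-- popcount k = bin(k).count("1") for k ≥ 0 (exact on that domain).
def popcountB (n : Nat) : Nat :=
  if n = 0 then 0 else popcountB (n/2) + n % 2
  decreasing_by omega

-- the while loop of Source B, on the Nat mirror of n (n ≤ 0 never enters the loop)
def altLoop (n : Nat) (pow3 total : Int) : Int :=
  if n = 0 then total
  else altLoop (n / 2) (pow3 * 3)
         (if n % 2 = 1 then total + pow3 * 2 ^ (popcountB (n / 2)) else total)
  decreasing_by omega

def count_odd_coefficients_alt (n : Int) : Int := altLoop n.toNat 1 0

-- ===== PRECONDITION & SPEC =====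
-- Pre_ excludes negative n, on which Python A recurses without reaching a base case
-- and raises RecursionError (it returns no value there).
def Pre_count_odd_coefficients (n : Int) : Prop := 0 ≤ n
instance (n : Int) : Decidable (Pre_count_odd_coefficients n) := by unfold Pre_count_odd_coefficients; infer_instance
def pvWitness_count_odd_coefficients : Int := 6

def Spec_count_odd_coefficients (n : Int) (out : Int) : Prop := out = count_odd_coefficients_alt n
instance (n : Int) (out : Int) : Decidable (Spec_count_odd_coefficients n out) := by unfold Spec_count_odd_coefficients; infer_instance

-- ===== CLAIM =====
def Claim_equal_count_odd_coefficients : Prop := ∀ (n : Int), Dom_count_odd_coefficients n → Pre_count_odd_coefficients n → Spec_count_odd_coefficients n (count_odd_coefficients n)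

-- ===== LEMMAS AND PROOFS =====

-- the mathematical sum B computes
def Sm (m : Nat) : Int := ∑ k ∈ Finset.range m, (2:Int) ^ (popcountB k)

lemma pc_two_mul (m : Nat) : popcountB (2*m) = popcountB m := by
  rcases Nat.eq_zero_or_pos m with h | h
  · subst h; rfl
  · rw [popcountB]
    have h2 : 2*m ≠ 0 := by omega
    have h3 : 2*m/2 = m := by omega
    have h4 : 2*m % 2 = 0 := by omega
    simp [h2, h3, h4]

lemma pc_two_mul_add_one (m : Nat) : popcountB (2*m+1) = popcountB m + 1 := by
  rw [popcountB]
  have h3 : (2*m+1)/2 = m := by omega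
  have h4 : (2*m+1) % 2 = 1 := by omega
  simp [h3, h4]

lemma Sm_succ (m : Nat) : Sm (m+1) = Sm m + 2 ^ (popcountB m) := by
  simp [Sm, Finset.sum_range_succ]

lemma Sm_double (m : Nat) : Sm (2*m) = 3 * Sm m := by
  induction m with
  | zero => rfl
  | succ m ih =>
    have : 2*(m+1) = (2*m+1)+1 := by ring
    rw [this, Sm_succ, show 2*m+1 = (2*m)+1 from rfl, Sm_succ, ih,
        Sm_succ, pc_two_mul, pc_two_mul_add_one, pow_succ]
    ring

lemma countA_eq (n : Nat) : countA_rec n = Sm n := by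
  induction n using Nat.strong_induction_on with
  | _ n ih =>
    match n with
    | 0 => rw [countA_rec]; simp [Sm]
    | 1 => rw [countA_rec, show (1:Nat) = 0+1 from rfl, Sm_succ, popcountB]; simp [Sm]
    | n+2 =>
      rw [countA_rec]
      by_cases h : (n+2) % 2 = 0
      · have hm : n+2 = 2*((n+2)/2) := by omega
        rw [if_pos h, ih ((n+2)/2) (by omega)]
        calc 3 * Sm ((n+2)/2) = Sm (2*((n+2)/2)) := (Sm_double _).symm
          _ = Sm (n+2) := by rw [← hm]
      · have hk : n+2 = 2*((n+2-1)/2)+1 := by omega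
        set k := (n+2-1)/2 with hkdef
        rw [if_neg h, ih k (by omega), ih (k+1) (by omega)]
        rw [Sm_succ]
        calc 2 * Sm k + (Sm k + 2 ^ popcountB k)
            = 3 * Sm k + 2 ^ popcountB k := by ring
          _ = Sm (2*k) + 2 ^ popcountB (2*k) := by rw [Sm_double, pc_two_mul]
          _ = Sm (2*k+1) := (Sm_succ _).symm
          _ = Sm (n+2) := by rw [← hk]

lemma Sm_odd (m : Nat) : Sm (2*m+1) = 3 * Sm m + 2 ^ (popcountB m) := by
  rw [show 2*m+1 = (2*m)+1 from rfl, Sm_succ, Sm_double, pc_two_mul]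

lemma altLoop_inv (n : Nat) (p t : Int) : altLoop n p t = t + p * Sm n := by
  induction n using Nat.strong_induction_on generalizing p t with
  | _ n ih =>
    rw [altLoop]
    by_cases h0 : n = 0
    · simp [h0, Sm]
    · rw [if_neg h0, ih (n/2) (by omega)]
      by_cases hb : n % 2 = 1
      · have hn : n = 2*(n/2)+1 := by omega
        rw [if_pos hb]
        calc t + p * 2 ^ popcountB (n/2) + p * 3 * Sm (n/2)
            = t + p * (3 * Sm (n/2) + 2 ^ popcountB (n/2)) := by ring
          _ = t + p * Sm (2*(n/2)+1) := by rw [Sm_odd]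
          _ = t + p * Sm n := by rw [← hn]
      · have hn : n = 2*(n/2) := by omega
        rw [if_neg hb]
        calc t + p * 3 * Sm (n/2)
            = t + p * (3 * Sm (n/2)) := by ring
          _ = t + p * Sm (2*(n/2)) := by rw [Sm_double]
          _ = t + p * Sm n := by rw [← hn]

lemma alt_eq_Sm (n : Int) : count_odd_coefficients_alt n = Sm n.toNat := by
  unfold count_odd_coefficients_alt
  rw [altLoop_inv]
  ring

-- ===== VERDICT =====
theorem count_odd_coefficients_spec : Claim_equal_count_odd_coefficients := by
  intro n _ hpre
  unfold Spec_count_odd_coefficients count_odd_coefficients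
  rw [countA_eq, alt_eq_Sm n]
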